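-- pv_equiv track=rewrite | github.com/masoud-ml/Cascading-Failures-in-CPS | main.py | node_is_not_functioning
-- ===== SOURCE A (Python) =====
-- def node_is_not_functioning(neighbors_list, network_A, network_B):
--     belongs_to_A = 0
--     belongs_to_B = 0
--
--     if not neighbors_list:
--         return True
--
--     for node in neighbors_list:
--         if node in network_A:
--             belongs_to_A += 1
--         elif node in network_B:
--             belongs_to_B += 1
--
--     if belongs_to_A > 0 and belongs_to_B > 0:
--         return False
--
--     return True
-- ===== SOURCE B (Python) =====
-- def node_is_not_functioning(neighbors_list, network_A, network_B):
--     if not neighbors_list: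
--         return True
--     ns = set(neighbors_list)
--     na = set(network_A)
--     nb = set(network_B)
--     has_A = bool(ns & na)
--     has_B = bool((ns & nb) - na)
--     return not (has_A and has_B)
-- ===== Notes on version B (the rewrite author's own statement) =====
-- stated objective: idiomatic
-- what changed: Replaces the per-node scan with counters by set intersection/difference: has_A = ns & na nonempty, has_B = (ns & nb) - na nonempty (the '- na' reproduces the elif), returning not (has_A and has_B).
import Mathlib
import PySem

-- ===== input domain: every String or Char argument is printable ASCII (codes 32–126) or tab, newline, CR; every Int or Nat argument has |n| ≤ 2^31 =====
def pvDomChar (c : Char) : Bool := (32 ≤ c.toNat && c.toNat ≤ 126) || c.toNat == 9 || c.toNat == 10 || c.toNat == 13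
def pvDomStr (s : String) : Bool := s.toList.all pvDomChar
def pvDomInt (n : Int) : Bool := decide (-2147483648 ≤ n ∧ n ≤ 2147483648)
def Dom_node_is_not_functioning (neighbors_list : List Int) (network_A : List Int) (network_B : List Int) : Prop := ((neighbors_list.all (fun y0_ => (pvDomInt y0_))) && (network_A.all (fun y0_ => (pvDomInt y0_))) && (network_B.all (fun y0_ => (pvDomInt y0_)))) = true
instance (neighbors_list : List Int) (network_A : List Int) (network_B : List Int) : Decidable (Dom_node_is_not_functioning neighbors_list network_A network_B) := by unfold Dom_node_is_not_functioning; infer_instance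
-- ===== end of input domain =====

-- B replaces A's per-node membership scan with counters by set intersection/difference (idiomatic).


-- ===== PORT A =====
-- literal transliteration: counters belongs_to_A / belongs_to_B, per-node loop with in/elif
def node_is_not_functioning (neighbors_list : List Int) (network_A : List Int) (network_B : List Int) : Bool :=
  if neighbors_list = [] then
    true
  else
    let counts : Int × Int := neighbors_list.foldl
      (fun (p : Int × Int) node =>
        if network_A.contains node then (p.1 + 1, p.2)
        else if network_B.contains node then (p.1, p.2 + 1)
        else p)
      (0, 0)
    if counts.1 > 0 && counts.2 > 0 then false else true

-- ===== PORT B =====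
-- literal transliteration of Source B: sets, intersections, difference
def node_is_not_functioning_alt (neighbors_list : List Int) (network_A : List Int) (network_B : List Int) : Bool :=
  if neighbors_list = [] then
    true
  else
    let ns : PySem.Set Int := PySem.Set.ofList neighbors_list
    let na : PySem.Set Int := PySem.Set.ofList network_A
    let nb : PySem.Set Int := PySem.Set.ofList network_B
    let has_A : Bool := !(PySem.Set.inter ns na).isEmpty
    let has_B : Bool := !(PySem.Set.diff (PySem.Set.inter ns nb) na).isEmpty
    !(has_A && has_B)

-- ===== PRECONDITION & SPEC =====
def Spec_node_is_not_functioning (neighbors_list : List Int) (network_A : List Int) (network_B : List Int) (out : Bool) : Prop := out = node_is_not_functioning_alt neighbors_list network_A network_B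
instance (neighbors_list : List Int) (network_A : List Int) (network_B : List Int) (out : Bool) : Decidable (Spec_node_is_not_functioning neighbors_list network_A network_B out) := by unfold Spec_node_is_not_functioning; infer_instance

-- ===== CLAIM (what is proved, stated in full; the proofs are below) =====
def Claim_equal_node_is_not_functioning : Prop := ∀ (neighbors_list : List Int) (network_A : List Int) (network_B : List Int), Dom_node_is_not_functioning neighbors_list network_A network_B → Spec_node_is_not_functioning neighbors_list network_A network_B (node_is_not_functioning neighbors_list network_A network_B)

-- ===== LEMMAS AND PROOFS =====

-- A's loop computes the two membership counts
theorem loopA_counts (network_A network_B : List Int) (l : List Int) (x y : Int) :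
    l.foldl
      (fun (p : Int × Int) node =>
        if network_A.contains node then (p.1 + 1, p.2)
        else if network_B.contains node then (p.1, p.2 + 1)
        else p)
      (x, y)
    = (x + l.countP (fun n => network_A.contains n),
       y + l.countP (fun n => !network_A.contains n && network_B.contains n)) := by
  induction l generalizing x y with
  | nil => simp
  | cons h t ih =>
    simp only [List.foldl_cons]
    by_cases hA : h ∈ network_A
    · rw [if_pos (by simpa using hA), ih, List.countP_cons, List.countP_cons]
      refine Prod.ext ?_ ?_ <;> simp [hA] <;> omega
    · by_cases hB : h ∈ network_B
      · rw [if_neg (by simpa using hA), if_pos (by simpa using hB), ih,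
          List.countP_cons, List.countP_cons]
        refine Prod.ext ?_ ?_ <;> simp [hA, hB] <;> omega
      · rw [if_neg (by simpa using hA), if_neg (by simpa using hB), ih,
          List.countP_cons, List.countP_cons]
        refine Prod.ext ?_ ?_ <;> simp [hA, hB]

theorem node_is_not_functioning_spec' (neighbors_list network_A network_B : List Int) :
    node_is_not_functioning neighbors_list network_A network_B
      = node_is_not_functioning_alt neighbors_list network_A network_B := by
  unfold node_is_not_functioning node_is_not_functioning_alt
  by_cases hn : neighbors_list = []
  · simp [hn]
  · simp only [hn, if_false]
    rw [loopA_counts]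
    rw [Bool.eq_iff_iff]
    simp [PySem.Set.inter, PySem.Set.diff, List.isEmpty_iff,
      List.filter_eq_nil_iff, PySem.Set.mem_ofList, List.countP_pos_iff,
      -List.countP_eq_zero]
-- ===== VERDICT (by name: the statement is the Claim_ definition above) =====
theorem node_is_not_functioning_spec : Claim_equal_node_is_not_functioning := by
  intro ns nA nB _
  exact node_is_not_functioning_spec' ns nA nB
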